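-- pv_equiv track=rewrite | github.com/niluferbagevi-gif/Sidar | agent/roles/coverage_agent.py | _clean_code_output
-- ===== SOURCE A (Python) =====
-- def _clean_code_output(raw_output: str) -> str:
--     """LLM çıktısından gelebilecek markdown kod çitlerini temizler."""
--     clean_text = str(raw_output or "").strip()
--     lines = clean_text.splitlines()
--     blocks: list[tuple[str, str]] = []
--     in_fence = False
--     current_lang = ""
--     current_code: list[str] = []
--
--     for line in lines:
--         marker = line.strip()
--         if marker.startswith("```"):
--             if not in_fence:
--                 in_fence = True
--                 current_lang = marker[3:].strip().lower()
--                 current_code = []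
--                 continue
--             blocks.append((current_lang, "\n".join(current_code).strip()))
--             in_fence = False
--             current_lang = ""
--             current_code = []
--             continue
--         if in_fence:
--             current_code.append(line)
--
--     if blocks:
--         python_blocks = [code for lang, code in blocks if lang == "python" and code]
--         selected_blocks = python_blocks or [code for _, code in blocks if code]
--         return "\n\n".join(selected_blocks).strip()
--
--     if in_fence:
--         return "\n".join(current_code).strip()
--
--     return clean_text
-- ===== SOURCE B (Python) =====
-- def _scan(lines):
--     """Chunk scanner: jump from fence to fence, collecting (lang, body) pairs.
--
--     Returns (blocks, tail) where tail is the body of an unterminated trailing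
--     fence (None if the last fence was closed or there was none)."""
--     blocks = []
--     i, n = 0, len(lines)
--     while i < n:
--         marker = lines[i].strip()
--         i += 1
--         if marker.startswith("```"):
--             body = []
--             while i < n and not lines[i].strip().startswith("```"):
--                 body.append(lines[i])
--                 i += 1
--             if i == n:
--                 return blocks, body
--             blocks.append((marker[3:].strip().lower(), "\n".join(body).strip()))
--             i += 1
--     return blocks, None
--
--
-- def _clean_code_output(raw_output: str) -> str:
--     clean_text = (raw_output or "").strip()
--     blocks, tail = _scan(clean_text.splitlines())
--     if blocks:
--         python_blocks = [code for lang, code in blocks if lang == "python" and code]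
--         selected_blocks = python_blocks or [code for _, code in blocks if code]
--         return "\n\n".join(selected_blocks).strip()
--     if tail is not None:
--         return "\n".join(tail).strip()
--     return clean_text
-- ===== Notes on version B (the rewrite author's own statement) =====
-- stated objective: alternative
-- what changed: Replaces A's per-line boolean fence state machine (in_fence flag threaded through one foldl-style loop) with a two-pointer chunk scanner that jumps from an opening fence directly to its closing fence, slicing out each block body in one inner sweep; the selection of python/non-empty blocks is unchanged.
import Mathlib
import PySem

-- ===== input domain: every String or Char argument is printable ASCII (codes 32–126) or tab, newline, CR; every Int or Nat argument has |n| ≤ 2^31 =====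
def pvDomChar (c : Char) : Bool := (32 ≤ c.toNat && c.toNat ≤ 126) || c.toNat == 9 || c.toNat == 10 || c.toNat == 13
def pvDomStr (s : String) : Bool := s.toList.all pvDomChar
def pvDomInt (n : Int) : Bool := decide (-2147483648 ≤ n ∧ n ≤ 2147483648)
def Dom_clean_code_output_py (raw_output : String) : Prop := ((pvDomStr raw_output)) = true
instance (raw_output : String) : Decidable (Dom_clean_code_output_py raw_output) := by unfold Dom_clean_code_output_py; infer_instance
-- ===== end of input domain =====

-- B replaces A's per-line in_fence state machine by a fence-to-fence chunk scanner (alternative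
-- decomposition, same cost); the block-selection step is unchanged.

-- ===== PORT A =====
-- state: (blocks, in_fence, current_lang, current_code)
def pvStepA (st : List (List Char × List Char) × Bool × List Char × List (List Char))
    (line : List Char) : List (List Char × List Char) × Bool × List Char × List (List Char) :=
  let marker := PySem.Chars.strip line
  if PySem.Chars.startswith marker ['`', '`', '`'] then
    if st.2.1 = false then
      (st.1, true, PySem.Chars.lower (PySem.Chars.strip (PySem.List.slice marker (some 3) none)), [])
    else
      (st.1 ++ [(st.2.2.1, PySem.Chars.strip (PySem.Chars.join ['\n'] st.2.2.2))], false, [], [])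
  else if st.2.1 then (st.1, st.2.1, st.2.2.1, st.2.2.2 ++ [line])
  else st

def clean_code_output_py (raw_output : String) : String :=
  let clean_text := PySem.Chars.strip raw_output.toList
  let lines := PySem.Chars.splitlines clean_text
  let st := lines.foldl pvStepA ([], false, [], [])
  let blocks := st.1
  if blocks.isEmpty = false then
    let python_blocks :=
      (blocks.filter (fun p => p.1 == ['p','y','t','h','o','n'] && !(p.2 == []))).map (·.2)
    let selected_blocks :=
      if python_blocks.isEmpty = false then python_blocks
      else (blocks.filter (fun p => !(p.2 == []))).map (·.2)
    String.ofList (PySem.Chars.strip (PySem.Chars.join ['\n','\n'] selected_blocks))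
  else if st.2.1 then
    String.ofList (PySem.Chars.strip (PySem.Chars.join ['\n'] st.2.2.2))
  else
    String.ofList clean_text

-- ===== PORT B =====
-- inner while of _scan: collect body lines up to the next fence line; `none` = ran off the end
def pvSplitAtFence : List (List Char) → List (List Char) × Option (List (List Char))
  | [] => ([], none)
  | l :: rest =>
    if PySem.Chars.startswith (PySem.Chars.strip l) ['`', '`', '`'] then ([], some rest)
    else
      let (body, after) := pvSplitAtFence rest
      (l :: body, after)

theorem pvSplitAtFence_some_length : ∀ (cs : List (List Char)) (body after : List (List Char)),
    pvSplitAtFence cs = (body, some after) → after.length < cs.length := by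
  intro cs
  induction cs with
  | nil => intro b a h; simp [pvSplitAtFence] at h
  | cons l rest ih =>
    intro b a h
    by_cases hf : PySem.Chars.startswith (PySem.Chars.strip l) ['`', '`', '`'] = true
    · rw [pvSplitAtFence, if_pos hf, Prod.mk.injEq] at h
      obtain ⟨-, h2⟩ := h
      cases h2
      simp only [List.length_cons]; omega
    · rcases hr : pvSplitAtFence rest with ⟨body', after?⟩
      rw [pvSplitAtFence, if_neg hf, hr] at h
      rw [Prod.mk.injEq] at h
      obtain ⟨-, h2⟩ := h
      subst h2
      have := ih body' a hr
      simp only [List.length_cons]; omega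

-- outer loop of _scan: jump from fence to fence, collecting (lang, body) blocks
def pvScanB : List (List Char) → List (List Char × List Char) × Option (List (List Char))
  | [] => ([], none)
  | l :: rest =>
    let marker := PySem.Chars.strip l
    if PySem.Chars.startswith marker ['`', '`', '`'] then
      match h : pvSplitAtFence rest with
      | (body, none) => ([], some body)
      | (body, some after) =>
        let (bs, tail) := pvScanB after
        ((PySem.Chars.lower (PySem.Chars.strip (PySem.List.slice marker (some 3) none)),
          PySem.Chars.strip (PySem.Chars.join ['\n'] body)) :: bs, tail)
    else pvScanB rest
termination_by cs => cs.length
decreasing_by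
  · have := pvSplitAtFence_some_length rest body after h
    simp [List.length_cons]; omega
  · simp [List.length_cons]

def clean_code_output_py_alt (raw_output : String) : String :=
  let clean_text := PySem.Chars.strip raw_output.toList
  let (blocks, tail) := pvScanB (PySem.Chars.splitlines clean_text)
  if blocks.isEmpty = false then
    let python_blocks :=
      (blocks.filter (fun p => p.1 == ['p','y','t','h','o','n'] && !(p.2 == []))).map (·.2)
    let selected_blocks :=
      if python_blocks.isEmpty = false then python_blocks
      else (blocks.filter (fun p => !(p.2 == []))).map (·.2)
    String.ofList (PySem.Chars.strip (PySem.Chars.join ['\n','\n'] selected_blocks))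
  else
    match tail with
    | some t => String.ofList (PySem.Chars.strip (PySem.Chars.join ['\n'] t))
    | none => String.ofList clean_text

-- ===== PRECONDITION & SPEC =====
def Spec_clean_code_output_py (raw_output : String) (out : String) : Prop := out = clean_code_output_py_alt raw_output
instance (raw_output : String) (out : String) : Decidable (Spec_clean_code_output_py raw_output out) := by unfold Spec_clean_code_output_py; infer_instance

-- ===== CLAIM (what is proved, stated in full; the proofs are below) =====
def Claim_equal_clean_code_output_py : Prop := ∀ (raw_output : String), Dom_clean_code_output_py raw_output → Spec_clean_code_output_py raw_output (clean_code_output_py raw_output)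

-- ===== LEMMAS AND PROOFS =====

-- A's loop from an in-fence state consumes exactly the lines up to the next fence line
theorem pv_fold_fence : ∀ (lines : List (List Char)) (acc : List (List Char × List Char))
    (lg : List Char) (c : List (List Char)),
    lines.foldl pvStepA (acc, true, lg, c) =
      match pvSplitAtFence lines with
      | (body, none) => (acc, true, lg, c ++ body)
      | (body, some after) =>
        after.foldl pvStepA
          (acc ++ [(lg, PySem.Chars.strip (PySem.Chars.join ['\n'] (c ++ body)))], false, [], []) := by
  intro lines
  induction lines with
  | nil => intro acc lg c; simp [pvSplitAtFence]
  | cons l rest ih =>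
    intro acc lg c
    by_cases hf : PySem.Chars.startswith (PySem.Chars.strip l) ['`', '`', '`'] = true
    · rw [pvSplitAtFence, if_pos hf]
      simp [pvStepA, hf]
    · rw [pvSplitAtFence, if_neg hf]
      rw [Bool.not_eq_true] at hf
      rcases hsp : pvSplitAtFence rest with ⟨body, after?⟩
      have hstep : List.foldl pvStepA (acc, true, lg, c) (l :: rest)
          = List.foldl pvStepA (acc, true, lg, c ++ [l]) rest := by
        simp [pvStepA, hf]
      rw [hstep, ih acc lg (c ++ [l]), hsp]
      cases after? <;> simp

-- A's loop from a closed state computes B's chunk scan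
theorem pv_fold_scan (lines : List (List Char)) :
    ∀ (acc : List (List Char × List Char)),
    ∃ lg, lines.foldl pvStepA (acc, false, [], []) =
      match pvScanB lines with
      | (bs, none) => (acc ++ bs, false, [], ([] : List (List Char)))
      | (bs, some t) => (acc ++ bs, true, lg, t) := by
  induction lines using pvScanB.induct with
  | case1 => intro acc; exact ⟨[], by simp [pvScanB]⟩
  | case2 l rest marker hf body hsp =>
    intro acc
    have hf' : PySem.Chars.startswith (PySem.Chars.strip l) ['`', '`', '`'] = true := hf
    refine ⟨PySem.Chars.lower (PySem.Chars.strip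
      (PySem.List.slice (PySem.Chars.strip l) (some 3) none)), ?_⟩
    have hstep : List.foldl pvStepA (acc, false, [], []) (l :: rest)
        = List.foldl pvStepA (acc, true,
            PySem.Chars.lower (PySem.Chars.strip
              (PySem.List.slice (PySem.Chars.strip l) (some 3) none)), []) rest := by
      simp [pvStepA, hf']
    rw [hstep, pv_fold_fence rest, hsp, pvScanB, if_pos hf, hsp]
    simp
  | case3 l rest marker hf body after hsp bs tail hbt ih =>
    intro acc
    have hf' : PySem.Chars.startswith (PySem.Chars.strip l) ['`', '`', '`'] = true := hf
    have hstep : List.foldl pvStepA (acc, false, [], []) (l :: rest)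
        = List.foldl pvStepA (acc, true,
            PySem.Chars.lower (PySem.Chars.strip
              (PySem.List.slice (PySem.Chars.strip l) (some 3) none)), []) rest := by
      simp [pvStepA, hf']
    obtain ⟨lg, hrest⟩ := ih (acc ++ [(PySem.Chars.lower (PySem.Chars.strip
      (PySem.List.slice (PySem.Chars.strip l) (some 3) none)),
      PySem.Chars.strip (PySem.Chars.join ['\n'] body))])
    refine ⟨lg, ?_⟩
    rw [hstep, pv_fold_fence rest, hsp]
    simp only [List.nil_append]
    rw [hrest, pvScanB, if_pos hf, hsp]
    rcases tail with _ | t <;> simp [hbt]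
  | case4 l rest marker hf ih =>
    intro acc
    rw [Bool.not_eq_true] at hf
    have hf' : PySem.Chars.startswith (PySem.Chars.strip l) ['`', '`', '`'] = false := hf
    obtain ⟨lg, hrest⟩ := ih acc
    refine ⟨lg, ?_⟩
    have hstep : List.foldl pvStepA (acc, false, [], []) (l :: rest)
        = List.foldl pvStepA (acc, false, [], []) rest := by
      simp [pvStepA, hf']
    rw [hstep, hrest, pvScanB, if_neg (by simp [hf'])]

-- ===== VERDICT (by name: the statement is the Claim_ definition above) =====
theorem clean_code_output_py_spec : Claim_equal_clean_code_output_py := by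
  intro raw _
  unfold Spec_clean_code_output_py
  obtain ⟨lg, hfold⟩ :=
    pv_fold_scan (PySem.Chars.splitlines (PySem.Chars.strip raw.toList)) []
  rcases hscan : pvScanB (PySem.Chars.splitlines (PySem.Chars.strip raw.toList)) with ⟨bs, t?⟩
  rw [hscan] at hfold
  rcases t? with _ | t <;> simp only [List.nil_append] at hfold
  all_goals
    simp only [clean_code_output_py, clean_code_output_py_alt]
    rw [hscan, hfold]
    simp
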